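-- pv_equiv track=rewrite | github.com/Chesterhuang1999/Veri-qec | src/surface_code_partition.py | sym_gen
-- ===== SOURCE A (Python) =====
-- from collections import defaultdict
--
-- def coord_to_index(x, y, distance):
--     return x * distance + y
--
-- def sym_gen(n):
--     groups = defaultdict(list)
--     mid = n // 2
--     for i in range(mid):
--         for j in range(n):
--             sind = coord_to_index(i, j, n)
--             groups[sind] = [sind, coord_to_index(n - 1 - i, n - 1 - j, n)]
--     for j in range(mid):
--         sind = coord_to_index(mid, j, n)
--         groups[sind] = [sind, coord_to_index(mid, n - 1 - j, n)]
--     sym_x, sym_z = [], []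
--     for value in groups.values():
--         k, l = value[0], value[1]
--         sym_x.append(f"ex_({k + 1}) <= ex_({l + 1})")
--         sym_z.append(f"ez_({k + 1}) <= ez_({l + 1})")
--     sym_x, sym_z = '&&'.join(sym_x), '&&'.join(sym_z)
--     return sym_x, sym_z
-- ===== SOURCE B (Python) =====
-- def sym_gen(n):
--     xs, zs = [], []
--     if n > 0:
--         mid = n // 2
--         # Representative cells occupy exactly the linear indices 0 .. mid*(n+1)-1:
--         # rows 0..mid-1 fully, then the first mid cells of row mid.  The point
--         # mirror of linear index k is n*n-1-k; within the middle row the mirror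
--         # is the same-row reflection k + n-1-2*j.
--         for k in range(mid * (n + 1)):
--             i, j = divmod(k, n)
--             l = n * n - 1 - k if i < mid else k + n - 1 - 2 * j
--             xs.append(f"ex_({k + 1}) <= ex_({l + 1})")
--             zs.append(f"ez_({k + 1}) <= ez_({l + 1})")
--     return '&&'.join(xs), '&&'.join(zs)
-- ===== Notes on version B (the rewrite author's own statement) =====
-- stated objective: alternative
-- what changed: Replaces the nested coordinate loops plus defaultdict plus separate formatting pass by one flat loop over linear cell indices k in range(mid*(n+1)) (the representatives form a contiguous prefix), recovering (i,j) with divmod and computing the mirror in closed form (point mirror n*n-1-k, or same-row mirror k+n-1-2*j in the middle row), formatting directly.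
import Mathlib
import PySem

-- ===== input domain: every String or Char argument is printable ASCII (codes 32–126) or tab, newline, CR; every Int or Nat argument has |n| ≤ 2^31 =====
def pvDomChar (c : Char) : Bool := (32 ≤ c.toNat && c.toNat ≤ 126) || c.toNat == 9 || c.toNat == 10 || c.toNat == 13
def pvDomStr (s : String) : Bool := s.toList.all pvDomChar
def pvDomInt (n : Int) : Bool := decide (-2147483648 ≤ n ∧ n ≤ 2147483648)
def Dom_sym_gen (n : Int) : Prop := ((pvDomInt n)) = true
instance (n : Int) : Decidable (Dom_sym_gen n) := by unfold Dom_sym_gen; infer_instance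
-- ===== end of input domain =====

-- B replaces A's nested coordinate loops + defaultdict + formatting pass by one flat loop over
-- linear cell indices with closed-form mirror arithmetic (objective: alternative; same asymptotic cost).

-- ===== PORT A =====
def coord_to_index (x y distance : Int) : Int := x * distance + y

def fmtAx (k l : Int) : List Char :=
  "ex_(".toList ++ PySem.Int.toChars (k + 1) ++ ") <= ex_(".toList ++ PySem.Int.toChars (l + 1) ++ ")".toList

def fmtAz (k l : Int) : List Char :=
  "ez_(".toList ++ PySem.Int.toChars (k + 1) ++ ") <= ez_(".toList ++ PySem.Int.toChars (l + 1) ++ ")".toList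

def sym_gen (n : Int) : String × String :=
  let mid := PySem.Int.floordiv n 2
  let groups : PySem.Dict Int (List Int) :=
    (PySem.List.pyRange 0 mid 1).foldl (fun g i =>
      (PySem.List.pyRange 0 n 1).foldl (fun g j =>
        let sind := coord_to_index i j n
        g.insert sind [sind, coord_to_index (n - 1 - i) (n - 1 - j) n]) g)
      PySem.Dict.empty
  let groups :=
    (PySem.List.pyRange 0 mid 1).foldl (fun g j =>
      let sind := coord_to_index mid j n
      g.insert sind [sind, coord_to_index mid (n - 1 - j) n]) groups
  -- every stored value has length 2, so value[0] / value[1] never raise; the `.getD 0` is unreachable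
  let sxz := groups.values.foldl (fun (acc : List (List Char) × List (List Char)) value =>
      let k := (PySem.List.pyGet? value 0).getD 0
      let l := (PySem.List.pyGet? value 1).getD 0
      (acc.1 ++ [fmtAx k l], acc.2 ++ [fmtAz k l])) ([], [])
  (String.ofList (PySem.Chars.join "&&".toList sxz.1), String.ofList (PySem.Chars.join "&&".toList sxz.2))

-- ===== PORT B =====
def fmtB (p : List Char) (k l : Int) : List Char :=
  p ++ "_(".toList ++ PySem.Int.toChars (k + 1) ++ ") <= ".toList ++ p ++
    "_(".toList ++ PySem.Int.toChars (l + 1) ++ ")".toList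

def sym_gen_alt (n : Int) : String × String :=
  let xz : List (List Char) × List (List Char) :=
    if 0 < n then
      let mid := PySem.Int.floordiv n 2
      (PySem.List.pyRange 0 (mid * (n + 1)) 1).foldl (fun acc k =>
        let i := PySem.Int.floordiv k n
        let j := PySem.Int.mod k n
        let l := if i < mid then n * n - 1 - k else k + n - 1 - 2 * j
        (acc.1 ++ [fmtB "ex".toList k l], acc.2 ++ [fmtB "ez".toList k l])) ([], [])
    else ([], [])
  (String.ofList (PySem.Chars.join "&&".toList xz.1), String.ofList (PySem.Chars.join "&&".toList xz.2))

-- ===== PRECONDITION & SPEC =====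
def Spec_sym_gen (n : Int) (out : String × String) : Prop := out = sym_gen_alt n
instance (n : Int) (out : String × String) : Decidable (Spec_sym_gen n out) := by unfold Spec_sym_gen; infer_instance

-- ===== CLAIM =====
def Claim_equal_sym_gen : Prop := ∀ (n : Int), Dom_sym_gen n → Spec_sym_gen n (sym_gen n)

-- ===== LEMMAS AND PROOFS =====

-- the cell index (i, j) ↦ i*n + j is injective while 0 ≤ j < n
lemma key_inj (n i j i' j' : Int) (hj : 0 ≤ j) (hjn : j < n) (hj' : 0 ≤ j') (hjn' : j' < n)
    (h : i * n + j = i' * n + j') : i = i' ∧ j = j' := by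
  have h1 : (i - i') * n = j' - j := by ring_nf; ring_nf at h; linarith
  rcases lt_trichotomy i i' with hlt | heq | hgt
  · exfalso
    have h2 : 1 * n ≤ (i' - i) * n := mul_le_mul_of_nonneg_right (by omega) (by omega)
    have h3 : (i' - i) * n = -((i - i') * n) := by ring
    omega
  · exact ⟨heq, by subst heq; linarith⟩
  · exfalso
    have h2 : 1 * n ≤ (i - i') * n := mul_le_mul_of_nonneg_right (by omega) (by omega)
    omega

lemma keys1_nodup (n mid : Int) :
    ((PySem.List.pyRange 0 mid 1).flatMap
      (fun i => (PySem.List.pyRange 0 n 1).map (fun j => i * n + j))).Nodup := by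
  rw [List.nodup_flatMap]
  refine ⟨fun i _ => (PySem.List.nodup_pyRange_one 0 n).map (fun a b h => by omega), ?_⟩
  refine (PySem.List.nodup_pyRange_one 0 mid).imp ?_
  intro i i' hne x hx hx'
  simp only [List.mem_map] at hx hx'
  obtain ⟨j, hj, rfl⟩ := hx
  obtain ⟨j', hj', he⟩ := hx'
  rw [PySem.List.mem_pyRange_one] at hj hj'
  exact hne ((key_inj n i' j' i j hj'.1 hj'.2 hj.1 hj.2 he).1).symm

-- the two insertion loops of A touch pairwise distinct, fresh keys, so the dict's values
-- list is exactly the generation-order list of [k, l] pairs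
lemma groups_values (n mid : Int) (h2 : mid < n) :
    (((PySem.List.pyRange 0 mid 1).foldl (fun (g : PySem.Dict Int (List Int)) j =>
        g.insert (mid * n + j) [mid * n + j, mid * n + (n - 1 - j)])
      ((PySem.List.pyRange 0 mid 1).foldl (fun g i =>
        (PySem.List.pyRange 0 n 1).foldl (fun g j =>
          g.insert (i * n + j) [i * n + j, (n - 1 - i) * n + (n - 1 - j)]) g)
        PySem.Dict.empty)).values : List (List Int))
    = (PySem.List.pyRange 0 mid 1).flatMap (fun i =>
        (PySem.List.pyRange 0 n 1).map (fun j => [i * n + j, (n - 1 - i) * n + (n - 1 - j)]))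
      ++ (PySem.List.pyRange 0 mid 1).map (fun j => [mid * n + j, mid * n + (n - 1 - j)]) := by
  have hA :
      ((PySem.List.pyRange 0 mid 1).foldl (fun g i =>
        (PySem.List.pyRange 0 n 1).foldl (fun g j =>
          g.insert (i * n + j) [i * n + j, (n - 1 - i) * n + (n - 1 - j)]) g)
        (PySem.Dict.empty : PySem.Dict Int (List Int)))
      = ((PySem.List.pyRange 0 mid 1).flatMap (fun i =>
          (PySem.List.pyRange 0 n 1).map (fun j => (i, j)))).foldl
          (fun g p => g.insert (p.1 * n + p.2)
            [p.1 * n + p.2, (n - 1 - p.1) * n + (n - 1 - p.2)]) PySem.Dict.empty := by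
    rw [List.foldl_flatMap]
    simp [List.foldl_map]
  rw [hA]
  have hnd1 : (((PySem.List.pyRange 0 mid 1).flatMap (fun i =>
      (PySem.List.pyRange 0 n 1).map (fun j => (i, j)))).map
        (fun p : Int × Int => p.1 * n + p.2)).Nodup := by
    have he : ((PySem.List.pyRange 0 mid 1).flatMap (fun i =>
        (PySem.List.pyRange 0 n 1).map (fun j => (i, j)))).map (fun p : Int × Int => p.1 * n + p.2)
        = (PySem.List.pyRange 0 mid 1).flatMap
            (fun i => (PySem.List.pyRange 0 n 1).map (fun j => i * n + j)) := by
      simp [List.map_flatMap, List.map_map, Function.comp_def]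
    rw [he]
    exact keys1_nodup n mid
  have hitems1 := PySem.Dict.items_foldl_insert_fresh
      ((PySem.List.pyRange 0 mid 1).flatMap (fun i =>
        (PySem.List.pyRange 0 n 1).map (fun j => (i, j))))
      (fun p : Int × Int => p.1 * n + p.2)
      (fun p : Int × Int => [p.1 * n + p.2, (n - 1 - p.1) * n + (n - 1 - p.2)])
      (PySem.Dict.empty : PySem.Dict Int (List Int))
      (fun a _ => PySem.Dict.contains_empty _) hnd1
  have hie : (PySem.Dict.empty : PySem.Dict Int (List Int)).items = [] := rfl
  have hfresh2 : ∀ a ∈ PySem.List.pyRange 0 mid 1,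
      (((PySem.List.pyRange 0 mid 1).flatMap (fun i =>
          (PySem.List.pyRange 0 n 1).map (fun j => (i, j)))).foldl
          (fun g p => g.insert (p.1 * n + p.2)
            [p.1 * n + p.2, (n - 1 - p.1) * n + (n - 1 - p.2)])
          (PySem.Dict.empty : PySem.Dict Int (List Int))).contains (mid * n + a) = false := by
    intro a ha
    rw [PySem.List.mem_pyRange_one] at ha
    rw [PySem.Dict.contains_eq_decide_mem_keys]
    simp only [PySem.Dict.keys, hitems1, hie, List.nil_append, List.map_map]
    simp only [decide_eq_false_iff_not, List.mem_map, List.mem_flatMap, Function.comp_def,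
      PySem.List.mem_pyRange_one]
    rintro ⟨⟨i, j⟩, ⟨i0, hi0, ⟨j0, hj0, hp⟩⟩, he⟩
    injection hp with hpi hpj
    subst hpi; subst hpj
    have := key_inj n i0 j0 mid a hj0.1 hj0.2 (by omega) (by omega) (by simpa using he)
    omega
  have hitems2 := PySem.Dict.items_foldl_insert_fresh (PySem.List.pyRange 0 mid 1)
      (fun j => mid * n + j) (fun j => [mid * n + j, mid * n + (n - 1 - j)]) _
      hfresh2
      ((PySem.List.nodup_pyRange_one 0 mid).map (fun a b h => by omega))
  simp only [PySem.Dict.values, hitems2, hitems1, hie, List.nil_append, List.map_append, List.map_map]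
  simp [List.map_flatMap, List.map_map, Function.comp_def]

lemma fmt_pair_x (k l : Int) : fmtAx k l = fmtB "ex".toList k l := by
  simp only [fmtAx, fmtB, List.append_assoc]; rfl

lemma fmt_pair_z (k l : Int) : fmtAz k l = fmtB "ez".toList k l := by
  simp only [fmtAz, fmtB, List.append_assoc]; rfl

-- a shifted unit range is a mapped unit range
lemma pyRange_shift (a c : Int) :
    PySem.List.pyRange a (a + c) 1 = (PySem.List.pyRange 0 c 1).map (fun j => a + j) := by
  rw [PySem.List.pyRange_one, PySem.List.pyRange_one]
  have : (a + c - a).toNat = (c - 0).toNat := by omega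
  rw [this, List.map_map]
  simp [Function.comp_def]

-- range(0, m*n) is the concatenation of the rows' ranges
lemma flat_rows (n : Int) (m : Nat) (hn : 0 < n) :
    (PySem.List.pyRange 0 (m : Int) 1).flatMap
      (fun i => PySem.List.pyRange (i * n) (i * n + n) 1)
    = PySem.List.pyRange 0 ((m : Int) * n) 1 := by
  induction m with
  | zero => simp [PySem.List.pyRange_one_eq_nil]
  | succ m ih =>
    have h1 : ((m : Int) + 1) = ((m + 1 : Nat) : Int) := by push_cast; ring
    rw [← h1, PySem.List.pyRange_one_succ_right (by positivity), List.flatMap_append, ih]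
    simp only [List.flatMap_cons, List.flatMap_nil, List.append_nil]
    rw [← PySem.List.pyRange_one_append 0 ((m : Int) * n) ((m : Int) * n + n)
        (mul_nonneg (by positivity) (le_of_lt hn)) (by omega)]
    congr 1
    ring

theorem sym_gen_eq_alt (n : Int) : sym_gen n = sym_gen_alt n := by
  simp only [sym_gen, sym_gen_alt, coord_to_index]
  by_cases hn : n ≤ 1
  · have hmid : PySem.Int.floordiv n 2 ≤ 0 := by
      rw [PySem.Int.floordiv_eq_ediv_of_pos (by omega)]; omega
    rw [PySem.List.pyRange_one_eq_nil hmid]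
    by_cases hn0 : 0 < n
    · have : PySem.Int.floordiv n 2 * (n + 1) ≤ 0 :=
        mul_nonpos_of_nonpos_of_nonneg hmid (by omega)
      rw [if_pos hn0, PySem.List.pyRange_one_eq_nil this]
      simp [PySem.Dict.values, PySem.Dict.empty, PySem.Chars.join]
    · rw [if_neg hn0]
      simp [PySem.Dict.values, PySem.Dict.empty, PySem.Chars.join]
  · -- n ≥ 2
    have hn2 : 2 ≤ n := by omega
    have hpos : 0 < n := by omega
    have hfd : PySem.Int.floordiv n 2 = n / 2 := PySem.Int.floordiv_eq_ediv_of_pos (by omega)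
    set mid := PySem.Int.floordiv n 2 with hmiddef
    have hmb : 1 ≤ mid ∧ mid < n := by rw [hfd]; omega
    rw [groups_values n mid hmb.2]
    rw [PySem.List.foldl_prod_mk
        (f := fun a v => a ++ [fmtAx ((PySem.List.pyGet? v 0).getD 0) ((PySem.List.pyGet? v 1).getD 0)])
        (g := fun a v => a ++ [fmtAz ((PySem.List.pyGet? v 0).getD 0) ((PySem.List.pyGet? v 1).getD 0)])]
    rw [if_pos hpos]
    rw [PySem.List.foldl_prod_mk
        (f := fun acc k => acc ++ [fmtB "ex".toList k
          (if PySem.Int.floordiv k n < mid then n * n - 1 - k else k + n - 1 - 2 * PySem.Int.mod k n)])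
        (g := fun acc k => acc ++ [fmtB "ez".toList k
          (if PySem.Int.floordiv k n < mid then n * n - 1 - k else k + n - 1 - 2 * PySem.Int.mod k n)])]
    simp only [PySem.List.foldl_append_singleton_eq_map, List.nil_append]
    -- decompose B's flat range into A's two regions
    obtain ⟨M, hM⟩ : ∃ M : Nat, mid = (M : Int) := ⟨mid.toNat, by omega⟩
    have hsplit : PySem.List.pyRange 0 (mid * (n + 1)) 1
        = (PySem.List.pyRange 0 mid 1).flatMap (fun i => PySem.List.pyRange (i * n) (i * n + n) 1)
          ++ PySem.List.pyRange (mid * n) (mid * n + mid) 1 := by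
      rw [hM, flat_rows n M hpos, ← hM]
      rw [← PySem.List.pyRange_one_append 0 (mid * n) (mid * n + mid)
          (mul_nonneg (by omega) (by omega)) (by omega)]
      congr 1
      ring
    rw [hsplit]
    simp only [List.map_append, List.map_flatMap]
    -- pointwise agreement on each region, for either formatter
    have hrow : ∀ (fm : Int → Int → List Char), ∀ i ∈ PySem.List.pyRange 0 mid 1,
        (PySem.List.pyRange (i * n) (i * n + n) 1).map (fun k => fm k
          (if PySem.Int.floordiv k n < mid then n * n - 1 - k else k + n - 1 - 2 * PySem.Int.mod k n))
        = (PySem.List.pyRange 0 n 1).map (fun j => fm (i * n + j) ((n - 1 - i) * n + (n - 1 - j))) := by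
      intro fm i hi
      rw [PySem.List.mem_pyRange_one] at hi
      rw [pyRange_shift (i * n) n, List.map_map]
      refine List.map_congr_left ?_
      intro j hj
      rw [PySem.List.mem_pyRange_one] at hj
      simp only [Function.comp_def]
      have hdiv : PySem.Int.floordiv (i * n + j) n = i := by
        rw [PySem.Int.floordiv_eq_ediv_of_pos hpos]
        rw [add_comm, Int.add_mul_ediv_right j i (by omega), Int.ediv_eq_zero_of_lt hj.1 hj.2]
        omega
      rw [hdiv, if_pos hi.2]
      congr 1
      ring
    have htail : ∀ (fm : Int → Int → List Char),
        (PySem.List.pyRange (mid * n) (mid * n + mid) 1).map (fun k => fm k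
          (if PySem.Int.floordiv k n < mid then n * n - 1 - k else k + n - 1 - 2 * PySem.Int.mod k n))
        = (PySem.List.pyRange 0 mid 1).map (fun j => fm (mid * n + j) (mid * n + (n - 1 - j))) := by
      intro fm
      rw [pyRange_shift (mid * n) mid, List.map_map]
      refine List.map_congr_left ?_
      intro j hj
      rw [PySem.List.mem_pyRange_one] at hj
      simp only [Function.comp_def]
      have hdiv : PySem.Int.floordiv (mid * n + j) n = mid := by
        rw [PySem.Int.floordiv_eq_ediv_of_pos hpos]
        rw [add_comm, Int.add_mul_ediv_right j mid (by omega),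
          Int.ediv_eq_zero_of_lt hj.1 (by omega)]
        omega
      have hmod : PySem.Int.mod (mid * n + j) n = j := by
        rw [PySem.Int.mod_eq_emod_of_pos hpos]
        rw [add_comm, mul_comm mid n, Int.add_mul_emod_self_left, Int.emod_eq_of_lt hj.1 (by omega)]
      rw [hdiv, hmod, if_neg (lt_irrefl mid)]
      congr 1
      ring
    refine Prod.ext ?_ ?_ <;>
      · simp only []
        congr 1
        congr 1
        refine congrArg₂ (· ++ ·) ?_ ?_
        · refine (List.flatMap_congr ?_).symm
          intro i hi
          rw [hrow _ i hi, List.map_map]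
          refine List.map_congr_left ?_
          intro j _
          simp [PySem.List.pyGet?, PySem.List.pyIdx?, fmt_pair_x, fmt_pair_z]
        · rw [htail, List.map_map]
          refine (List.map_congr_left ?_).symm
          intro j _
          simp [PySem.List.pyGet?, PySem.List.pyIdx?, fmt_pair_x, fmt_pair_z]

-- ===== VERDICT =====
theorem sym_gen_spec : Claim_equal_sym_gen := by
  intro n _
  unfold Spec_sym_gen
  exact sym_gen_eq_alt n
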